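-- pv_equiv track=rewrite | github.com/Toprun123/Aliquot-Grapher | defaults.py | aliquot
-- ===== SOURCE A (Python) =====
-- def sum_fact(x):
--     r = 0
--     for i in range(1, x):
--        if x % i == 0:
--            r+=i
--     return r
--
-- def aliquot(x):
--     r = []
--     for _ in range(250):
--         if x == 0:
--             return r
--         else:
--             x = sum_fact(x)
--             r.append(x)
--     return r
-- ===== SOURCE B (Python) =====
-- def sum_proper(n):
--     if n <= 0:
--         return 0
--     total = 0
--     d = 1
--     while d * d <= n:
--         if n % d == 0:
--             total += d
--             q = n // d
--             if q != d:
--                 total += q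
--         d += 1
--     return total - n
--
-- def aliquot(x):
--     def step(n, k):
--         if k == 0 or n == 0:
--             return []
--         m = sum_proper(n)
--         return [m] + step(m, k - 1)
--     return step(x, 250)
-- ===== Notes on version B (the rewrite author's own statement) =====
-- stated objective: faster
-- what changed: The proper-divisor sum is computed by trial division up to sqrt(n), adding each divisor d together with its cofactor n/d (then subtracting n), instead of scanning every i in range(1, x); the outer 250-step iteration is rewritten as a recursion that prepends each term.
import Mathlib
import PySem

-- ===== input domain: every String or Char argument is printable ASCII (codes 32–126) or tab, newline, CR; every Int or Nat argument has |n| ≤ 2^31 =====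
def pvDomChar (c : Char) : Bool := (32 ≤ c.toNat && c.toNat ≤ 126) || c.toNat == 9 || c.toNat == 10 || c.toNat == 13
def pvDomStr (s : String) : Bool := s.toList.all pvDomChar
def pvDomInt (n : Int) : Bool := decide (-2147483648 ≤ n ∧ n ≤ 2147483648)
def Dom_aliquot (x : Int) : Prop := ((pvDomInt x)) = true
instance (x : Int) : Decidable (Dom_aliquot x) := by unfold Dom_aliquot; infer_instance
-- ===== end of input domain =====

-- B replaces A's O(x) proper-divisor-sum scan by trial division up to sqrt(x)
-- (pairing each divisor d with its cofactor x//d), and builds the sequence by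
-- recursion instead of an accumulator loop: objective "faster" (asymptotic per step).

-- ===== PORT A =====
-- sum_fact: r = 0; for i in range(1, x): if x % i == 0: r += i
def sumFact (x : Int) : Int :=
  (PySem.List.pyRange 1 x 1).foldl (fun r i => if PySem.Int.mod x i = 0 then r + i else r) 0

-- for _ in range(250): if x == 0: return r; else: x = sum_fact(x); r.append(x)
def aliquotLoopA : Nat → Int → List Int → List Int
  | 0, _, r => r
  | k+1, x, r =>
    if x = 0 then r
    else
      let x' := sumFact x
      aliquotLoopA k x' (r ++ [x'])

def aliquot (x : Int) : List Int := aliquotLoopA 250 x []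

-- ===== PORT B =====
-- while d * d <= n: if n % d == 0: total += d; q = n // d; if q != d: total += q; d += 1
def sumProperLoop (n d total : Int) : Int :=
  if d * d ≤ n then
    sumProperLoop n (d + 1)
      (if PySem.Int.mod n d = 0 then
        (let q := PySem.Int.floordiv n d
         if q ≠ d then total + d + q else total + d)
       else total)
  else total
termination_by (n + 1 - d).toNat
decreasing_by
  have hd : d ≤ n := by nlinarith [sq_nonneg d, sq_nonneg (d - 1)]
  omega

def sumProper (n : Int) : Int :=
  if n ≤ 0 then 0 else sumProperLoop n 1 0 - n

-- step(n, k): if k == 0 or n == 0: return []; m = sum_proper(n); return [m] + step(m, k-1)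
def aliquotStepB : Int → Nat → List Int
  | _, 0 => []
  | n, k+1 =>
    if n = 0 then []
    else
      let m := sumProper n
      m :: aliquotStepB m k

def aliquot_alt (x : Int) : List Int := aliquotStepB x 250

-- ===== PRECONDITION & SPEC =====
def Spec_aliquot (x : Int) (out : List Int) : Prop := out = aliquot_alt x
instance (x : Int) (out : List Int) : Decidable (Spec_aliquot x out) := by unfold Spec_aliquot; infer_instance

-- ===== CLAIM (what is proved, stated in full; the proofs are below) =====
def Claim_equal_aliquot : Prop := ∀ (x : Int), Dom_aliquot x → Spec_aliquot x (aliquot x)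

-- ===== LEMMAS AND PROOFS =====

-- A's scan over range(1, n) is the sum over the proper-divisor candidates in Ico a n.
theorem sumFact_foldl_eq (n : Nat) : ∀ (a : Nat) (acc : Int),
    (PySem.List.pyRange (a : Int) (n : Int) 1).foldl
      (fun r i => if PySem.Int.mod (n : Int) i = 0 then r + i else r) acc
    = acc + ∑ i ∈ Finset.Ico a n, (if i ∣ n then (i : Int) else 0) := by
  suffices H : ∀ (m a : Nat) (acc : Int), n - a = m →
      (PySem.List.pyRange (a : Int) (n : Int) 1).foldl
        (fun r i => if PySem.Int.mod (n : Int) i = 0 then r + i else r) acc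
      = acc + ∑ i ∈ Finset.Ico a n, (if i ∣ n then (i : Int) else 0) by
    intro a acc; exact H (n - a) a acc rfl
  intro m
  induction m with
  | zero =>
    intro a acc h
    have hna : n ≤ a := by omega
    rw [PySem.List.pyRange_one_eq_nil (by exact_mod_cast hna)]
    simp [Finset.Ico_eq_empty_of_le hna]
  | succ m ih =>
    intro a acc h
    have hlt : a < n := by omega
    rw [PySem.List.pyRange_one_cons (by exact_mod_cast hlt)]
    simp only [List.foldl_cons]
    rw [show ((a : Int) + 1) = ((a + 1 : Nat) : Int) by push_cast; ring]
    rw [ih (a + 1) _ (by omega)]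
    rw [Finset.sum_eq_sum_Ico_succ_bot hlt]
    have hmod : PySem.Int.mod (n : Int) (a : Int) = ((n % a : Nat) : Int) :=
      PySem.Int.mod_natCast n a
    by_cases hd : a ∣ n
    · have hz : n % a = 0 := Nat.dvd_iff_mod_eq_zero.mp hd
      rw [hmod, if_pos (by exact_mod_cast hz), if_pos hd]
      ring
    · have hz : n % a ≠ 0 := fun hc => hd (Nat.dvd_iff_mod_eq_zero.mpr hc)
      rw [hmod, if_neg (by exact_mod_cast hz), if_neg hd]
      ring

-- B's while-loop computes the paired-divisor sum over Ico d (sqrt n + 1).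
theorem sumProperLoop_eq (n : Nat) : ∀ (hm : Nat) (d : Nat) (total : Int), 1 ≤ d → n.sqrt + 1 - d = hm →
    sumProperLoop (n : Int) (d : Int) total
    = total + ∑ i ∈ Finset.Ico d (n.sqrt + 1),
        (if i ∣ n then ((i : Int) + (if n / i ≠ i then ((n / i : Nat) : Int) else 0)) else 0) := by
  intro hm
  induction hm with
  | zero =>
    intro d total hd h
    have hgt : n.sqrt < d := by omega
    have hguard : ¬ ((d : Int) * d ≤ (n : Int)) := by
      have : n < d * d := Nat.sqrt_lt.mp hgt
      exact_mod_cast Nat.not_le.mpr this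
    rw [sumProperLoop, if_neg hguard]
    rw [Finset.Ico_eq_empty_of_le (by omega)]
    simp
  | succ m ih =>
    intro d total hd h
    have hle : d ≤ n.sqrt := by omega
    have hguard : ((d : Int) * d ≤ (n : Int)) := by
      have := Nat.le_sqrt.mp hle
      exact_mod_cast this
    rw [sumProperLoop, if_pos hguard]
    rw [show ((d : Int) + 1) = ((d + 1 : Nat) : Int) by push_cast; ring]
    rw [ih (d + 1) _ (by omega) (by omega)]
    rw [Finset.sum_eq_sum_Ico_succ_bot (show d < n.sqrt + 1 by omega)]
    have hmod : PySem.Int.mod (n : Int) (d : Int) = ((n % d : Nat) : Int) :=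
      PySem.Int.mod_natCast n d
    have hdiv : PySem.Int.floordiv (n : Int) (d : Int) = ((n / d : Nat) : Int) :=
      PySem.Int.floordiv_natCast n d
    by_cases hdvd : d ∣ n
    · have hz : n % d = 0 := Nat.dvd_iff_mod_eq_zero.mp hdvd
      rw [hmod, hdiv, if_pos (by exact_mod_cast hz), if_pos hdvd]
      by_cases hq : n / d = d
      · rw [if_neg (by exact_mod_cast not_not.mpr (by exact_mod_cast hq)), if_neg (not_not.mpr hq)]
        push_cast [hq]; ring
      · rw [if_pos (by exact_mod_cast hq), if_pos hq]
        ring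
    · have hz : n % d ≠ 0 := fun hc => hdvd (Nat.dvd_iff_mod_eq_zero.mpr hc)
      rw [hmod, if_neg (by exact_mod_cast hz), if_neg hdvd]
      ring

-- The divisor-pairing identity (Nat form): proper-divisor sum + n = paired sum up to sqrt n.
theorem pairing_nat (n : Nat) (hn : 1 ≤ n) :
    (∑ i ∈ n.properDivisors, i) + n
    = ∑ i ∈ Finset.Ico 1 (n.sqrt + 1),
        (if i ∣ n then (i + (if n / i ≠ i then n / i else 0)) else 0) := by
  have h0 : n ≠ 0 := by omega
  rw [← Finset.sum_filter]
  have hIco : (Finset.Ico 1 (n.sqrt + 1)).filter (· ∣ n) =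
      n.divisors.filter (fun d => d ≤ n.sqrt) := by
    ext d
    simp only [Finset.mem_filter, Finset.mem_Ico, Nat.mem_divisors]
    constructor
    · rintro ⟨⟨h1, h2⟩, hd⟩; exact ⟨⟨hd, h0⟩, by omega⟩
    · rintro ⟨⟨hd, -⟩, hle⟩
      have : 0 < d := Nat.pos_of_dvd_of_pos hd hn
      exact ⟨⟨by omega, by omega⟩, hd⟩
  rw [hIco, Finset.sum_add_distrib, ← Finset.sum_filter]
  have hbij : ∑ d ∈ (n.divisors.filter (fun d => d ≤ n.sqrt)).filter (fun d => n / d ≠ d), n / d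
      = ∑ e ∈ n.divisors.filter (fun d => ¬ d ≤ n.sqrt), e := by
    apply Finset.sum_nbij' (i := fun d => n / d) (j := fun e => n / e)
    · intro d hdm
      simp only [Finset.mem_filter, Nat.mem_divisors] at hdm ⊢
      obtain ⟨⟨⟨hd, -⟩, hle⟩, hne⟩ := hdm
      have hdpos : 0 < d := Nat.pos_of_dvd_of_pos hd hn
      have hq : d * (n / d) = n := Nat.mul_div_cancel' hd
      have hdd : d * d ≤ n := Nat.le_sqrt.mp hle
      have hne2 : d * d ≠ n := by
        intro hc
        apply hne
        have := hq.trans hc.symm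
        exact Nat.eq_of_mul_eq_mul_left hdpos this
      have hlt : d < n / d := by
        rcases Nat.lt_or_ge d (n / d) with h | h
        · exact h
        · exfalso
          have h1 : d * (n / d) ≤ d * d := Nat.mul_le_mul_left d h
          have h2 : n ≤ d * d := hq ▸ h1
          exact hne2 (Nat.le_antisymm hdd h2)
      refine ⟨⟨Nat.div_dvd_of_dvd hd, h0⟩, ?_⟩
      have hqpos : 0 < n / d := lt_of_le_of_lt (Nat.zero_le d) hlt
      have : n < (n / d) * (n / d) := by
        calc n = d * (n / d) := hq.symm
        _ < (n / d) * (n / d) := (Nat.mul_lt_mul_right hqpos).mpr hlt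
      have := Nat.sqrt_lt.mpr this
      omega
    · intro e hem
      simp only [Finset.mem_filter, Nat.mem_divisors] at hem ⊢
      obtain ⟨⟨he, -⟩, hgt⟩ := hem
      have hepos : 0 < e := Nat.pos_of_dvd_of_pos he hn
      have hq : e * (n / e) = n := Nat.mul_div_cancel' he
      have hlt : n < e * e := Nat.sqrt_lt.mp (by omega)
      have hqe : n / e < e := by
        apply Nat.lt_of_mul_lt_mul_left (a := e)
        rw [hq]; exact hlt
      have hsq : (n / e) * (n / e) ≤ n := by
        calc (n / e) * (n / e) ≤ (n / e) * e := Nat.mul_le_mul_left _ (le_of_lt hqe)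
        _ = n := by rw [Nat.mul_comm]; exact hq
      have hle : n / e ≤ n.sqrt := Nat.le_sqrt.mpr hsq
      have hdd : n / (n / e) = e := Nat.div_div_self he h0
      exact ⟨⟨⟨Nat.div_dvd_of_dvd he, h0⟩, hle⟩, by omega⟩
    · intro d hdm
      simp only [Finset.mem_filter, Nat.mem_divisors] at hdm
      exact Nat.div_div_self hdm.1.1.1 h0
    · intro e hem
      simp only [Finset.mem_filter, Nat.mem_divisors] at hem
      exact Nat.div_div_self hem.1.1 h0
    · intro d _; rfl
  rw [hbij, Finset.sum_filter_add_sum_filter_not]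
  rw [← Nat.sum_divisors_eq_sum_properDivisors_add_self]

theorem sumFact_eq_sumProper (x : Int) : sumFact x = sumProper x := by
  by_cases hx : x ≤ 0
  · unfold sumFact sumProper
    rw [PySem.List.pyRange_one_eq_nil (by omega : x ≤ (1:Int)), if_pos hx]
    rfl
  · rw [not_le] at hx
    obtain ⟨n, rfl⟩ : ∃ n : Nat, x = (n : Int) := ⟨x.toNat, (Int.toNat_of_nonneg (by omega)).symm⟩
    have hn : 1 ≤ n := by exact_mod_cast hx
    unfold sumFact sumProper
    rw [if_neg (by omega : ¬ ((n : Int) ≤ 0))]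
    have hA := sumFact_foldl_eq n 1 0
    have hB := sumProperLoop_eq n (n.sqrt + 1 - 1) 1 0 le_rfl rfl
    rw [Nat.cast_one] at hA hB
    rw [hA, hB]
    have hP := pairing_nat n hn
    have hcastA : ∑ i ∈ Finset.Ico 1 n, (if i ∣ n then (i : Int) else 0)
        = ((∑ i ∈ n.properDivisors, i : Nat) : Int) := by
      have : n.properDivisors = (Finset.Ico 1 n).filter (· ∣ n) := by
        ext d
        simp only [Nat.mem_properDivisors, Finset.mem_filter, Finset.mem_Ico]
        constructor
        · rintro ⟨hd, hlt⟩
          have : 0 < d := Nat.pos_of_dvd_of_pos hd (by omega)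
          exact ⟨⟨by omega, hlt⟩, hd⟩
        · rintro ⟨⟨-, hlt⟩, hd⟩; exact ⟨hd, hlt⟩
      rw [this, Finset.sum_filter, Nat.cast_sum]
      apply Finset.sum_congr rfl
      intro i _
      split_ifs <;> simp
    have hcastB : ∑ i ∈ Finset.Ico 1 (n.sqrt + 1),
          (if i ∣ n then ((i : Int) + (if n / i ≠ i then ((n / i : Nat) : Int) else 0)) else 0)
        = ((∑ i ∈ Finset.Ico 1 (n.sqrt + 1),
            (if i ∣ n then (i + (if n / i ≠ i then n / i else 0)) else 0) : Nat) : Int) := by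
      rw [Nat.cast_sum]
      apply Finset.sum_congr rfl
      intro i _
      split_ifs <;> simp
    rw [hcastA, hcastB, ← hP]
    push_cast
    ring


theorem loopA_eq_stepB (k : Nat) : ∀ (x : Int) (r : List Int),
    aliquotLoopA k x r = r ++ aliquotStepB x k := by
  induction k with
  | zero => intro x r; simp [aliquotLoopA, aliquotStepB]
  | succ k ih =>
    intro x r
    by_cases hx : x = 0
    · simp [aliquotLoopA, aliquotStepB, hx]
    · simp only [aliquotLoopA, aliquotStepB, hx, ih, sumFact_eq_sumProper]
      simp

-- ===== VERDICT (by name: the statement is the Claim_ definition above) =====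
theorem aliquot_spec : Claim_equal_aliquot := by
  intro x _
  unfold Spec_aliquot aliquot aliquot_alt
  simpa using loopA_eq_stepB 250 x []
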